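-- pv_equiv track=rewrite | github.com/addisonkline/aoc-2025 | day_3/utils.py | largest_digit_in_interval
-- ===== SOURCE A (Python) =====
-- def largest_digit_in_interval(
--     l: list[int],
--     idx_start: int,
--     idx_end: int,
-- ) -> tuple[int, int]:
--     """
--     Find the largest digit in a subrange of the given list.
--     Returns `largest_digit, index_largest_digit`.
--     """
--     largest = 0
--     idx = 0
--
--     for i in range(idx_start, idx_end):
--         digit = l[i]
--         if digit > largest:
--             largest = digit
--             idx = i
--
--     return largest, idx
-- ===== SOURCE B (Python) =====
-- def largest_digit_in_interval(
--     l: list[int],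
--     idx_start: int,
--     idx_end: int,
-- ) -> tuple[int, int]:
--     """
--     Find the largest digit in a subrange of the given list.
--     Returns `largest_digit, index_largest_digit`.
--     """
--     vals = [l[i] for i in range(idx_start, idx_end)]
--     largest = max(vals, default=0)
--     if largest <= 0:
--         return 0, 0
--     return largest, idx_start + vals.index(largest)
-- ===== Notes on version B (the rewrite author's own statement) =====
-- stated objective: simpler
-- what changed: A's single interleaved scan threading (largest, idx) through range(idx_start, idx_end) is replaced by a value-first/locate-second two-pass decomposition: gather vals = [l[i] for i in range(idx_start, idx_end)], compute max(vals, default=0) in one pass, and if positive locate its first occurrence with vals.index, offset by idx_start; since B indexes l[i] exactly as A does, it matches A (including negative-index wraparound) and raises IndexError exactly where A does.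
import Mathlib
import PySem

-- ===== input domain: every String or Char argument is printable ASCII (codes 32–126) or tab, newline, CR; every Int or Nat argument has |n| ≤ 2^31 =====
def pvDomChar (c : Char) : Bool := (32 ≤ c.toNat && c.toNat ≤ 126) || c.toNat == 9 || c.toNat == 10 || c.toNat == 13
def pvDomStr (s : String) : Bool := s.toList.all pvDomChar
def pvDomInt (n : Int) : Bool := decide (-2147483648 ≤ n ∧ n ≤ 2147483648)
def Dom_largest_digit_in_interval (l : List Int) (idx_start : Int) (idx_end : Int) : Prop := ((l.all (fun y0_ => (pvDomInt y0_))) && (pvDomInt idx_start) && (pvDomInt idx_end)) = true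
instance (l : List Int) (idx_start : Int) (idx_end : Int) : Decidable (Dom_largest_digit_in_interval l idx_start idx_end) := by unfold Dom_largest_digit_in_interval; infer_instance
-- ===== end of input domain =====

-- B replaces the interleaved (largest, idx) scan by a value-first/locate-second two-pass
-- decomposition over the same indexed values (simpler); neither side mutates its arguments.

-- ===== PORT A =====
-- one loop over range(idx_start, idx_end), tracking (largest, idx) with a strict '>' test
def largest_digit_in_interval (l : List Int) (idx_start : Int) (idx_end : Int) : Int × Int :=
  (PySem.List.pyRange idx_start idx_end 1).foldl
    (fun (st : Int × Int) (i : Int) =>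
      let digit := PySem.List.pyGetD l i 0   -- l[i]; Pre_ keeps every i in range, so the IndexError default is never used
      if digit > st.1 then (digit, i) else st)
    (0, 0)

-- ===== PORT B =====
-- Source B: vals = [l[i] for i in range(idx_start, idx_end)]; largest = max(vals, default=0);
--       locate the first occurrence with vals.index(largest), offset by idx_start
def largest_digit_in_interval_alt (l : List Int) (idx_start : Int) (idx_end : Int) : Int × Int :=
  let vals := (PySem.List.pyRange idx_start idx_end 1).map (fun i => PySem.List.pyGetD l i 0)
  let largest := PySem.List.maxD vals (fun x => x) 0
  if largest ≤ 0 then (0, 0)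
  else (largest, idx_start + ((PySem.List.index? vals largest).getD 0 : Int))
  -- vals.index(largest): largest ∈ vals whenever this branch runs (largest > 0 is not the default), so .getD 0 never hits none

-- ===== PRECONDITION & SPEC =====
-- Pre_ excludes exactly the inputs where Python raises IndexError: a nonempty range whose
-- indices reach below -len(l) or beyond len(l)-1 (both A and B access l[i] for every such i).
def Pre_largest_digit_in_interval (l : List Int) (idx_start : Int) (idx_end : Int) : Prop :=
  idx_start < idx_end → (-(l.length : Int) ≤ idx_start ∧ idx_end ≤ (l.length : Int))
instance (l : List Int) (idx_start : Int) (idx_end : Int) : Decidable (Pre_largest_digit_in_interval l idx_start idx_end) := by unfold Pre_largest_digit_in_interval; infer_instance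

def pvWitness_largest_digit_in_interval : List Int × Int × Int := ([1, 3, 2], 0, 3)

def Spec_largest_digit_in_interval (l : List Int) (idx_start : Int) (idx_end : Int) (out : Int × Int) : Prop := out = largest_digit_in_interval_alt l idx_start idx_end
instance (l : List Int) (idx_start : Int) (idx_end : Int) (out : Int × Int) : Decidable (Spec_largest_digit_in_interval l idx_start idx_end out) := by unfold Spec_largest_digit_in_interval; infer_instance

-- ===== CLAIM (what is proved, stated in full; the proofs are below) =====
def Claim_equal_largest_digit_in_interval : Prop := ∀ (l : List Int) (idx_start : Int) (idx_end : Int), Dom_largest_digit_in_interval l idx_start idx_end → Pre_largest_digit_in_interval l idx_start idx_end → Spec_largest_digit_in_interval l idx_start idx_end (largest_digit_in_interval l idx_start idx_end)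

-- ===== LEMMAS AND PROOFS =====

-- B's value-then-locate computation on the list of fetched values, with base index a
def pvLoopB (vals : List Int) (a : Int) (st : Int × Int) : Int × Int :=
  match PySem.List.max? vals (fun x => x) with
  | none => st
  | some m => if m > st.1 then (m, a + ((PySem.List.index? vals m).getD 0 : Int)) else st

lemma maxD_eq_getD_max? (xs : List Int) (d : Int) :
    PySem.List.maxD xs (fun x => x) d = (PySem.List.max? xs (fun x => x)).getD d := by
  cases xs <;> simp [PySem.List.maxD, PySem.List.max?]

lemma pvLoopB_nil (a : Int) (st : Int × Int) : pvLoopB [] a st = st := rfl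

-- folding one more value d into the scan = prepending d to the value-then-locate list
lemma pvLoopB_cons (d : Int) (rest : List Int) (a : Int) (st : Int × Int) :
    pvLoopB (d :: rest) a st = pvLoopB rest (a + 1) (if d > st.1 then (d, a) else st) := by
  cases rest with
  | nil =>
      simp only [pvLoopB, PySem.List.max?_id_cons, List.foldl_nil, PySem.List.index?_cons_self,
        Option.getD_some]
      split_ifs <;> simp [PySem.List.max?]
  | cons h t =>
      have hm : PySem.List.max? (h :: t) (fun y => y) = some (t.foldl max h) :=
        PySem.List.max?_id_cons h t
      have hdm : PySem.List.max? (d :: h :: t) (fun y => y) = some (max d (t.foldl max h)) := by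
        rw [PySem.List.max?_id_cons, List.foldl_cons, List.foldl_assoc]
      set m := t.foldl max h with hmdef
      have hmem : m ∈ h :: t := PySem.List.max?_mem hm
      rcases (show m ≤ d ∨ d < m by omega) with hle | hlt
      · -- the head d is (weakly) maximal: max = d, first index 0
        have hi1 : PySem.List.index? (d :: h :: t) d = some 0 :=
          PySem.List.index?_cons_self d (h :: t)
        simp only [pvLoopB, hdm, hm, max_eq_left hle, hi1, Option.getD_some]
        split_ifs <;> simp_all <;> omega
      · -- the max lives in the tail: max = m ≠ d, its first index shifts by one
        obtain ⟨k, hk⟩ : ∃ k, PySem.List.index? (h :: t) m = some k :=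
          Option.isSome_iff_exists.mp ((PySem.List.index?_isSome_iff (h :: t) m).mpr hmem)
        have hi2 : PySem.List.index? (d :: h :: t) m = some (k + 1) := by
          rw [PySem.List.index?_cons_of_ne (h :: t) (ne_of_lt hlt), hk]; rfl
        simp only [pvLoopB, hdm, hm, max_eq_right (le_of_lt hlt), hi2, hk, Option.getD_some]
        split_ifs <;> simp_all <;> omega

-- the central invariant: A's fold over range(a, a+n) with any fetch function f equals
-- B's value-then-locate on the mapped values
lemma fold_eq_pvLoopB (n : Nat) : ∀ (f : Int → Int) (a : Int) (st : Int × Int),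
    (PySem.List.pyRange a (a + (n : Nat)) 1).foldl
      (fun (st : Int × Int) (i : Int) =>
        let digit := f i
        if digit > st.1 then (digit, i) else st) st
    = pvLoopB ((PySem.List.pyRange a (a + (n : Nat)) 1).map f) a st := by
  induction n with
  | zero =>
      intro f a st
      simp only [Nat.cast_zero, add_zero]
      rw [PySem.List.pyRange_one_eq_nil (by omega)]
      simp [pvLoopB_nil]
  | succ n ih =>
      intro f a st
      have hcons := PySem.List.pyRange_one_cons (a := a) (b := a + ((n : Nat) + 1 : Nat)) (by omega)
      have hrange : a + (((n : Nat) + 1 : Nat) : Int) = (a + 1) + (n : Nat) := by push_cast; ring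
      rw [hcons, List.foldl_cons, List.map_cons, pvLoopB_cons]
      simp only [hrange]
      exact ih f (a + 1) _

lemma alt_eq_pvLoopB (l : List Int) (a b : Int) :
    largest_digit_in_interval_alt l a b =
      pvLoopB ((PySem.List.pyRange a b 1).map (fun i => PySem.List.pyGetD l i 0)) a (0, 0) := by
  simp only [largest_digit_in_interval_alt, pvLoopB, maxD_eq_getD_max?]
  cases hmx : PySem.List.max? ((PySem.List.pyRange a b 1).map (fun i => PySem.List.pyGetD l i 0))
      (fun x => x) with
  | none => simp
  | some m =>
      simp only [Option.getD_some]
      by_cases hm : m ≤ 0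
      · simp [hm, not_lt.mpr hm]
      · simp [hm, show m > 0 from lt_of_not_ge hm]

-- ===== VERDICT (by name: the statement is the Claim_ definition above) =====
theorem largest_digit_in_interval_spec : Claim_equal_largest_digit_in_interval := by
  intro l idx_start idx_end _ _
  unfold Spec_largest_digit_in_interval
  rw [alt_eq_pvLoopB]
  by_cases hse : idx_start < idx_end
  · have hn : idx_end = idx_start + ((idx_end - idx_start).toNat : Int) := by omega
    unfold largest_digit_in_interval
    rw [hn]
    exact fold_eq_pvLoopB (idx_end - idx_start).toNat _ idx_start (0, 0)
  · unfold largest_digit_in_interval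
    rw [PySem.List.pyRange_one_eq_nil (by omega)]
    simp [pvLoopB_nil]
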